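-- pv_equiv track=rewrite | github.com/JohnBee/AoC-2019 | python/Day6.py | bfs
-- ===== SOURCE A (Python) =====
-- import copy
--
-- def bfs(o, toVisit, visited, depth):
--     if toVisit == []:
--         return visited
--     vis = copy.deepcopy(toVisit)
--
--     d = depth + 1
--     for v in toVisit:
--         vis.remove(v)
--         if v in o.keys():
--             vis += o[v]
--         visited += [(v, depth)]
--     return bfs(o, vis, visited, d)
-- ===== SOURCE B (Python) =====
-- def bfs(o, toVisit, visited, depth):
--     # single FIFO queue of (node, depth) pairs, scanned by index; children appended
--     queue = [(v, depth) for v in toVisit]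
--     i = 0
--     while i < len(queue):
--         v, d = queue[i]
--         i += 1
--         visited.append((v, d))
--         queue.extend((c, d + 1) for c in o.get(v, []))
--     return visited
-- ===== Notes on version B (the rewrite author's own statement) =====
-- stated objective: faster
-- what changed: replaces the per-level recursion with deepcopy and repeated list.remove by a single iterative FIFO queue of (node, depth) pairs scanned by index, appending children as they are met
import Mathlib
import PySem

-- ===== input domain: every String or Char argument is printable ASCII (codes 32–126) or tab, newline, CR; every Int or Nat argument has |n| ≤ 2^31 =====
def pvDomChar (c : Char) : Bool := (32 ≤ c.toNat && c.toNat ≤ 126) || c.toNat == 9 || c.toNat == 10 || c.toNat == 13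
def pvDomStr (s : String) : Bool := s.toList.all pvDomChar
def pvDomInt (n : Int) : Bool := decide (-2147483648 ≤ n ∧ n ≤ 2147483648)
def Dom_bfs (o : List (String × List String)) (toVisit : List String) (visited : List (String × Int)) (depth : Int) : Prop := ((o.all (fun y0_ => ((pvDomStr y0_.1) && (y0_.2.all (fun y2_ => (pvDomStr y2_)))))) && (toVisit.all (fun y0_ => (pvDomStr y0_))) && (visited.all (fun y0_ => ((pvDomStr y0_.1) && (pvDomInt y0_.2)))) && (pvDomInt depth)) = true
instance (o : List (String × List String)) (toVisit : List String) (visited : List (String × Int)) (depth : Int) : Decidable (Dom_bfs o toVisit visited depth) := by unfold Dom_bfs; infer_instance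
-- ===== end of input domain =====

-- B replaces A's per-level recursion (deepcopy + repeated list.remove) by one iterative FIFO
-- queue of (node, depth) pairs: asymptotically faster, same return value. Both Pythons extend
-- the 'visited' list in place (same observable mutation); the theorems are about the return value.

-- ===== PORT A =====

-- children of v in the adjacency dict: o[v] if v in o.keys() else [] (first-match lookup)
def pvChildren (o : List (String × List String)) (v : String) : List String :=
  ((PySem.Dict.mk o).get? v).getD []

-- body of A's 'for v in toVisit' loop; state = (vis, visited).
-- vis.remove(v) never raises here (v is always the head of the remaining part of vis),
-- so the ValueError branch of remove? is unreachable: .getD keeps the state there.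
def bfsStepA (o : List (String × List String)) (depth : Int)
    (st : List String × List (String × Int)) (v : String) : List String × List (String × Int) :=
  let vis := (PySem.List.remove? st.1 v).getD st.1
  let vis := if (PySem.Dict.mk o).contains v then vis ++ ((PySem.Dict.mk o).get? v).getD [] else vis
  (vis, st.2 ++ [(v, depth)])

-- A's recursion, one fuel unit per level; fuel |o|+3 is enough on every input where the
-- Python terminates (under Pre_bfs the frontier is empty after |o|+2 levels, proved below)
def bfsAux (o : List (String × List String)) (fuel : Nat) (toVisit : List String)
    (visited : List (String × Int)) (depth : Int) : List (String × Int) :=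
  match fuel with
  | 0 => visited   -- fuel exhausted: unreachable under Pre_bfs
  | fuel + 1 =>
    if toVisit = [] then visited
    else
      let st := toVisit.foldl (bfsStepA o depth) (toVisit, visited)
      bfsAux o fuel st.1 st.2 (depth + 1)

def bfs (o : List (String × List String)) (toVisit : List String) (visited : List (String × Int)) (depth : Int) : List (String × Int) :=
  bfsAux o (o.length + 3) toVisit visited depth

-- ===== PORT B =====

-- Source B's while loop: queue scanned from the front, children appended at the back; one fuel
-- unit per dequeued node (the fuel below bounds the total number of dequeues under Pre_bfs)
def bfsAltAux (o : List (String × List String)) (fuel : Nat) (queue : List (String × Int))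
    (visited : List (String × Int)) : List (String × Int) :=
  match fuel, queue with
  | _, [] => visited
  | 0, _ :: _ => visited   -- fuel exhausted: unreachable under Pre_bfs
  | fuel + 1, (v, d) :: rest =>
    bfsAltAux o fuel (rest ++ (((PySem.Dict.mk o).get? v).getD []).map (fun c => (c, d + 1)))
      (visited ++ [(v, d)])

def bfs_alt (o : List (String × List String)) (toVisit : List String) (visited : List (String × Int)) (depth : Int) : List (String × Int) :=
  bfsAltAux o
    ((o.length + 2) * (toVisit.length * ((o.flatMap (fun p => p.2)).length + 1) ^ (o.length + 2)))
    (toVisit.map (fun v => (v, depth))) visited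

-- ===== PRECONDITION & SPEC =====

-- frontier after k steps (deduplicated so that Pre_bfs evaluates in polynomial time)
def pvFrontier (o : List (String × List String)) : Nat → List String → List String
  | 0, t => t
  | k + 1, t => pvFrontier o k ((t.flatMap (pvChildren o)).dedup)

-- Pre_bfs = exactly the inputs on which the Python A returns: A recurses until the frontier
-- (flatMap of children) is empty, and by pigeonhole on the |o| keys the frontier either dies
-- out within |o|+2 levels or never does (a cycle is reachable and A hits RecursionError).
def Pre_bfs (o : List (String × List String)) (toVisit : List String) (visited : List (String × Int)) (depth : Int) : Prop :=
  pvFrontier o (o.length + 2) toVisit = []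
instance (o : List (String × List String)) (toVisit : List String) (visited : List (String × Int)) (depth : Int) : Decidable (Pre_bfs o toVisit visited depth) := by unfold Pre_bfs; infer_instance

def pvWitness_bfs : (List (String × List String)) × List String × (List (String × Int)) × Int :=
  ([("a", ["b", "c"]), ("b", ["c"])], ["a"], [], 0)

def Spec_bfs (o : List (String × List String)) (toVisit : List String) (visited : List (String × Int)) (depth : Int) (out : List (String × Int)) : Prop := out = bfs_alt o toVisit visited depth
instance (o : List (String × List String)) (toVisit : List String) (visited : List (String × Int)) (depth : Int) (out : List (String × Int)) : Decidable (Spec_bfs o toVisit visited depth out) := by unfold Spec_bfs; infer_instance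

-- ===== CLAIM (what is proved, stated in full; the proofs are below) =====
def Claim_equal_bfs : Prop := ∀ (o : List (String × List String)) (toVisit : List String) (visited : List (String × Int)) (depth : Int), Dom_bfs o toVisit visited depth → Pre_bfs o toVisit visited depth → Spec_bfs o toVisit visited depth (bfs o toVisit visited depth)

-- ===== LEMMAS AND PROOFS =====

-- raw (non-deduplicated) frontier, and the common output of both programs
def iterL (o : List (String × List String)) : Nat → List String → List String
  | 0, t => t
  | k + 1, t => iterL o k (t.flatMap (pvChildren o))

def outL (o : List (String × List String)) : Nat → List String → Int → List (String × Int)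
  | 0, _, _ => []
  | k + 1, t, d => t.map (fun v => (v, d)) ++ outL o k (t.flatMap (pvChildren o)) (d + 1)

def sumLen (o : List (String × List String)) : Nat → List String → Nat
  | 0, _ => 0
  | k + 1, t => t.length + sumLen o k (t.flatMap (pvChildren o))

theorem frontier_mem (o : List (String × List String)) :
    ∀ (k : Nat) (s s' : List String), (∀ x, x ∈ s ↔ x ∈ s') →
    (∀ x, x ∈ pvFrontier o k s ↔ x ∈ iterL o k s') := by
  intro k
  induction k with
  | zero => intro s s' h x; simpa [pvFrontier, iterL] using h x
  | succ k ih =>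
    intro s s' h x
    simp only [pvFrontier, iterL]
    exact ih _ _ (by
      intro y
      simp only [List.mem_dedup, List.mem_flatMap]
      constructor
      · rintro ⟨a, ha, hy⟩; exact ⟨a, (h a).1 ha, hy⟩
      · rintro ⟨a, ha, hy⟩; exact ⟨a, (h a).2 ha, hy⟩) x

theorem pre_iterL (o : List (String × List String)) (t : List String)
    (h : pvFrontier o (o.length + 2) t = []) : iterL o (o.length + 2) t = [] := by
  have := frontier_mem o (o.length + 2) t t (fun x => Iff.rfl)
  rw [List.eq_nil_iff_forall_not_mem]
  intro x hx
  have := (this x).2 hx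
  rw [h] at this
  exact (List.not_mem_nil).elim this

theorem outL_nil (o : List (String × List String)) : ∀ k d, outL o k [] d = [] := by
  intro k; induction k with
  | zero => intro d; rfl
  | succ k ih => intro d; simpa [outL] using ih (d + 1)

-- A's inner for-loop: running it over r starting from vis = r ++ acc removes exactly the
-- r-part from the front and appends all children, while visited collects r at this depth.
theorem foldA_spec (o : List (String × List String)) (d : Int) :
    ∀ (r acc : List String) (va : List (String × Int)),
    r.foldl (bfsStepA o d) (r ++ acc, va) =
      (acc ++ r.flatMap (pvChildren o), va ++ r.map (fun v => (v, d))) := by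
  intro r
  induction r with
  | nil => intro acc va; simp
  | cons v r ih =>
    intro acc va
    have hstep : bfsStepA o d (v :: r ++ acc, va) v =
        (r ++ (acc ++ pvChildren o v), va ++ [(v, d)]) := by
      simp only [bfsStepA, List.cons_append, PySem.List.remove?_cons_self, Option.getD_some,
        pvChildren]
      by_cases h : (PySem.Dict.mk o).contains v
      · simp [h]
      · have hn : (PySem.Dict.mk o).get? v = none :=
          (PySem.Dict.get?_eq_none_iff_contains _ _).2 (Bool.eq_false_iff.2 h)
        simp [h, hn]
    simp only [List.foldl_cons]
    rw [hstep, ih]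
    simp [List.flatMap_cons]

theorem bfsAux_spec (o : List (String × List String)) :
    ∀ (k : Nat) (t : List String) (vis : List (String × Int)) (d : Int) (fuel : Nat),
    iterL o k t = [] → k ≤ fuel → bfsAux o fuel t vis d = vis ++ outL o k t d := by
  intro k
  induction k with
  | zero =>
    intro t vis d fuel ht _
    simp only [iterL] at ht
    subst ht
    cases fuel <;> simp [bfsAux, outL]
  | succ k ih =>
    intro t vis d fuel ht hf
    obtain ⟨f, rfl⟩ : ∃ f, fuel = f + 1 := ⟨fuel - 1, by omega⟩
    by_cases h : t = []
    · subst h; simp [bfsAux, outL_nil]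
    · simp only [bfsAux, if_neg h]
      have := foldA_spec o d t [] vis
      rw [List.append_nil] at this
      rw [this]
      simp only [List.nil_append]
      rw [ih _ _ _ f (by simpa [iterL] using ht) (by omega)]
      simp [outL]

theorem bfsAltAux_nil (o : List (String × List String)) (fuel : Nat) (vis : List (String × Int)) :
    bfsAltAux o fuel [] vis = vis := by
  cases fuel <;> rfl

-- one full level of B's queue loop
theorem bfsAlt_level (o : List (String × List String)) :
    ∀ (r : List String) (d : Int) (nxt : List (String × Int)) (vis : List (String × Int)) (f : Nat),
    bfsAltAux o (f + r.length) (r.map (fun v => (v, d)) ++ nxt) vis =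
      bfsAltAux o f (nxt ++ (r.flatMap (pvChildren o)).map (fun c => (c, d + 1)))
        (vis ++ r.map (fun v => (v, d))) := by
  intro r
  induction r with
  | nil => intro d nxt vis f; simp
  | cons v r ih =>
    intro d nxt vis f
    have : f + (v :: r).length = (f + r.length) + 1 := by simp; omega
    rw [this]
    simp only [List.map_cons, List.cons_append, bfsAltAux]
    rw [show r.map (fun v => (v, d)) ++ nxt ++ (((PySem.Dict.mk o).get? v).getD []).map (fun c => (c, d + 1))
        = r.map (fun v => (v, d)) ++ (nxt ++ (pvChildren o v).map (fun c => (c, d + 1))) by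
      simp [pvChildren]]
    rw [ih d _ _ f]
    simp [List.flatMap_cons]

theorem bfsAltAux_spec (o : List (String × List String)) :
    ∀ (k : Nat) (t : List String) (vis : List (String × Int)) (d : Int) (f : Nat),
    iterL o k t = [] →
    bfsAltAux o (f + sumLen o k t) (t.map (fun v => (v, d))) vis = vis ++ outL o k t d := by
  intro k
  induction k with
  | zero =>
    intro t vis d f ht
    simp only [iterL] at ht; subst ht
    simp [bfsAltAux_nil, outL, sumLen]
  | succ k ih =>
    intro t vis d f ht
    have : f + sumLen o (k + 1) t = (f + sumLen o k (t.flatMap (pvChildren o))) + t.length := by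
      simp [sumLen]; omega
    rw [this]
    have := bfsAlt_level o t d [] vis (f + sumLen o k (t.flatMap (pvChildren o)))
    rw [List.append_nil] at this
    rw [this, List.nil_append, ih _ _ _ f (by simpa [iterL] using ht)]
    simp [outL]

-- size bounds: total queue work is at most the fuel given to bfs_alt
theorem children_len_le (o : List (String × List String)) (v : String) :
    (pvChildren o v).length ≤ (o.flatMap (fun p => p.2)).length := by
  induction o with
  | nil => simp [pvChildren, PySem.Dict.get?]
  | cons p o ih =>
    simp only [pvChildren, List.flatMap_cons, List.length_append] at *
    by_cases h : p.1 == v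
    · have : ((PySem.Dict.mk (p :: o)).get? v) = some p.2 := by
        rw [show (p : String × List String) = (p.1, p.2) from rfl, PySem.Dict.get?_mk_cons]
        simp [h]
      rw [this]; simp
    · have : ((PySem.Dict.mk (p :: o)).get? v) = (PySem.Dict.mk o).get? v := by
        rw [show (p : String × List String) = (p.1, p.2) from rfl, PySem.Dict.get?_mk_cons]
        simp [h]
      rw [this]; omega

theorem flatMap_len_le (o : List (String × List String)) (t : List String) :
    (t.flatMap (pvChildren o)).length ≤ t.length * (o.flatMap (fun p => p.2)).length := by
  induction t with
  | nil => simp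
  | cons v t ih =>
    simp only [List.flatMap_cons, List.length_append, List.length_cons]
    have := children_len_le o v
    calc (pvChildren o v).length + (t.flatMap (pvChildren o)).length
        ≤ (o.flatMap (fun p => p.2)).length + t.length * (o.flatMap (fun p => p.2)).length := by omega
      _ = (t.length + 1) * (o.flatMap (fun p => p.2)).length := by ring

theorem sumLen_le (o : List (String × List String)) :
    ∀ (k : Nat) (t : List String),
    sumLen o k t ≤ k * (t.length * ((o.flatMap (fun p => p.2)).length + 1) ^ k) := by
  intro k
  induction k with
  | zero => intro t; simp [sumLen]
  | succ k ih =>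
    intro t
    set C := (o.flatMap (fun p => p.2)).length with hC
    have h1 : sumLen o k (t.flatMap (pvChildren o)) ≤
        k * ((t.flatMap (pvChildren o)).length * (C + 1) ^ k) := ih _
    have h2 : (t.flatMap (pvChildren o)).length ≤ t.length * C := flatMap_len_le o t
    have h3 : (t.flatMap (pvChildren o)).length * (C + 1) ^ k ≤ t.length * (C + 1) ^ (k + 1) := by
      rw [pow_succ]
      calc (t.flatMap (pvChildren o)).length * (C + 1) ^ k
          ≤ (t.length * C) * (C + 1) ^ k := Nat.mul_le_mul_right _ h2
        _ ≤ (t.length * (C + 1)) * (C + 1) ^ k := by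
            exact Nat.mul_le_mul_right _ (Nat.mul_le_mul_left _ (by omega))
        _ = t.length * ((C + 1) ^ k * (C + 1)) := by ring
    have h4 : t.length ≤ t.length * (C + 1) ^ (k + 1) := by
      have : 1 ≤ (C + 1) ^ (k + 1) := Nat.one_le_pow _ _ (by omega)
      calc t.length = t.length * 1 := by omega
        _ ≤ t.length * (C + 1) ^ (k + 1) := Nat.mul_le_mul_left _ this
    calc sumLen o (k + 1) t = t.length + sumLen o k (t.flatMap (pvChildren o)) := rfl
      _ ≤ t.length + k * ((t.flatMap (pvChildren o)).length * (C + 1) ^ k) := by omega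
      _ ≤ t.length * (C + 1) ^ (k + 1) + k * (t.length * (C + 1) ^ (k + 1)) := by
          have := Nat.mul_le_mul_left k h3; omega
      _ = (k + 1) * (t.length * (C + 1) ^ (k + 1)) := by ring

-- ===== VERDICT (by name: the statement is the Claim_ definition above) =====
theorem bfs_spec : Claim_equal_bfs := by
  intro o toVisit visited depth _ hpre
  unfold Spec_bfs
  have hempty : iterL o (o.length + 2) toVisit = [] := pre_iterL o toVisit hpre
  have hA : bfs o toVisit visited depth = visited ++ outL o (o.length + 2) toVisit depth :=
    bfsAux_spec o (o.length + 2) toVisit visited depth (o.length + 3) hempty (by omega)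
  have hle : sumLen o (o.length + 2) toVisit ≤
      (o.length + 2) * (toVisit.length * ((o.flatMap (fun p => p.2)).length + 1) ^ (o.length + 2)) :=
    sumLen_le o (o.length + 2) toVisit
  obtain ⟨f, hf⟩ : ∃ f, (o.length + 2) * (toVisit.length * ((o.flatMap (fun p => p.2)).length + 1) ^ (o.length + 2)) = f + sumLen o (o.length + 2) toVisit :=
    ⟨(o.length + 2) * (toVisit.length * ((o.flatMap (fun p => p.2)).length + 1) ^ (o.length + 2))
      - sumLen o (o.length + 2) toVisit, by omega⟩
  have hB : bfs_alt o toVisit visited depth = visited ++ outL o (o.length + 2) toVisit depth := by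
    unfold bfs_alt
    rw [hf]
    exact bfsAltAux_spec o (o.length + 2) toVisit visited depth f hempty
  rw [hA, hB]
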